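-- pv_equiv track=rewrite | github.com/Yeop-Dong/CodingTest_Study | 프로그래머스/4/42891. 무지의 먹방 라이브/무지의 먹방 라이브.py | solution
-- ===== SOURCE A (Python) =====
-- def solution(food_times, k):
--     answer = 0
--     food_times = [ (i+1, f) for i, f in enumerate(food_times) ]
--     food_times.sort(key = lambda x: x[1])
--     cur = 0
--     last = 0
--     while cur < len(food_times):
--         finished = food_times[cur][1] - last
--         cycle = len(food_times) - cur
--         finish_dish = cycle * finished
--         if finish_dish > k:
--             break
--         k -= finish_dish
--         last = food_times[cur][1]
--         cur += 1
--     if cur == len(food_times):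
--         return -1
--     food_times = food_times[cur:]
--     food_times.sort(key = lambda x: x[0])
--     cycle = len(food_times)
--     return food_times[k % cycle][0]
-- ===== SOURCE B (Python) =====
-- def solution(food_times, k):
--     # prefix-sum + binary search over time levels instead of A's level-by-level loop
--     pairs = sorted(enumerate(food_times, 1), key=lambda p: p[1])
--     n = len(pairs)
--     prefix = [0]
--     last = 0
--     rem = n
--     for _, t in pairs:
--         prefix.append(prefix[-1] + rem * (t - last))
--         last = t
--         rem -= 1
--     if n == 0 or prefix[n] <= k:
--         return -1
--     lo, hi = 0, n - 1
--     while lo < hi: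
--         mid = (lo + hi) // 2
--         if prefix[mid + 1] > k:
--             hi = mid
--         else:
--             lo = mid + 1
--     cur = lo
--     survivors = sorted(pairs[cur:], key=lambda p: p[0])
--     return survivors[(k - prefix[cur]) % len(survivors)][0]
-- ===== Notes on version B (the rewrite author's own statement) =====
-- stated objective: alternative
-- what changed: B replaces A's level-by-level while loop that mutates k with a precomputed prefix array of per-level eating costs and a binary search for the first level whose cumulative cost exceeds k.
import Mathlib
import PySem

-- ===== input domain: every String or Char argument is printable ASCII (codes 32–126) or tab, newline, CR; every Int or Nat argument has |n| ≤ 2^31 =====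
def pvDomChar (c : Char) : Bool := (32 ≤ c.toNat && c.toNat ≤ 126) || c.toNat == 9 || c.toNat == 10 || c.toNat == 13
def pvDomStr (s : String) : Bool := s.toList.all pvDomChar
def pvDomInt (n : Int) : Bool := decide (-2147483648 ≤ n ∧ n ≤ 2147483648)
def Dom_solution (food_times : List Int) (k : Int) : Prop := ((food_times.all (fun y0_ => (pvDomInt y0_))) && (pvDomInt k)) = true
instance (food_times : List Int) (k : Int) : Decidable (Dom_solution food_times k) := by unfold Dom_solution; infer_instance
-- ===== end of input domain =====

-- B replaces A's level-by-level elimination loop with a prefix array of level costs and a binary search (alternative algorithm, same asymptotic cost).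


-- ===== PORT A =====
-- A's while loop over cur/last/k, transliterated as structural recursion on the
-- suffix food_times[cur:] (cycle = len - cur = length of the suffix).
def loopA : List (Int × Int) → Int → Int → (List (Int × Int) × Int)
  | [], _, k => ([], k)
  | (i, t) :: rest, last, k =>
      let finished := t - last
      let cycle : Int := (rest.length : Int) + 1
      let finish_dish := cycle * finished
      if finish_dish > k then ((i, t) :: rest, k)
      else loopA rest t (k - finish_dish)

def solution (food_times : List Int) (k : Int) : Int :=
  let fts := PySem.List.sorted (PySem.List.enumerate food_times 1) (fun x => x.2) false
  let r := loopA fts 0 k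
  if r.1 = [] then -1
  else
    let rem2 := PySem.List.sorted r.1 (fun x => x.1) false
    (PySem.List.pyGetD rem2 (PySem.Int.mod r.2 ((rem2.length : Int))) (0, 0)).1

-- ===== PORT B =====
-- Source B's prefix-building loop: returns prefix[1:], carrying last and the running value.
def prefAux : List (Int × Int) → Int → Int → List Int
  | [], _, _ => []
  | (_, t) :: rest, last, acc =>
      let acc' := acc + ((rest.length : Int) + 1) * (t - last)
      acc' :: prefAux rest t acc'

-- Source B's binary-search while loop (lo, hi are nonnegative Python ints; Nat.div = Python // here).
def bsearch (pref : List Int) (k : Int) (lo hi : Nat) : Nat :=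
  if _h : lo < hi then
    if pref.getD ((lo + hi) / 2 + 1) 0 > k then bsearch pref k lo ((lo + hi) / 2)
    else bsearch pref k ((lo + hi) / 2 + 1) hi
  else lo
termination_by hi - lo
decreasing_by all_goals omega

def solution_alt (food_times : List Int) (k : Int) : Int :=
  let pairs := PySem.List.sorted (PySem.List.enumerate food_times 1) (fun x => x.2) false
  let n := pairs.length
  let pref := 0 :: prefAux pairs 0 0
  if n = 0 ∨ pref.getD n 0 ≤ k then -1
  else
    let cur := bsearch pref k 0 (n - 1)
    let survivors := PySem.List.sorted (pairs.drop cur) (fun x => x.1) false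
    (PySem.List.pyGetD survivors (PySem.Int.mod (k - pref.getD cur 0) ((survivors.length : Int))) (0, 0)).1

-- ===== PRECONDITION & SPEC =====
def Spec_solution (food_times : List Int) (k : Int) (out : Int) : Prop := out = solution_alt food_times k
instance (food_times : List Int) (k : Int) (out : Int) : Decidable (Spec_solution food_times k out) := by unfold Spec_solution; infer_instance

-- ===== CLAIM (what is proved, stated in full; the proofs are below) =====
def Claim_equal_solution : Prop := ∀ (food_times : List Int) (k : Int), Dom_solution food_times k → Spec_solution food_times k (solution food_times k)

-- ===== LEMMAS AND PROOFS =====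

-- cumulative cost of the first c levels (partial sums of A's finish_dish values)
def S : List (Int × Int) → Int → Nat → Int
  | _, _, 0 => 0
  | [], _, _ + 1 => 0
  | (_, t) :: rest, last, c + 1 => ((rest.length : Int) + 1) * (t - last) + S rest t c

-- the index at which A's loop stops
def cA : List (Int × Int) → Int → Int → Nat
  | [], _, _ => 0
  | (_, t) :: rest, last, k =>
    if ((rest.length : Int) + 1) * (t - last) > k then 0
    else 1 + cA rest t (k - ((rest.length : Int) + 1) * (t - last))

theorem loopA_eq (fts : List (Int × Int)) (last k : Int) :
    loopA fts last k = (fts.drop (cA fts last k), k - S fts last (cA fts last k)) := by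
  induction fts generalizing last k with
  | nil => simp [loopA, cA, S]
  | cons p rest ih =>
    obtain ⟨i, t⟩ := p
    by_cases h : ((rest.length : Int) + 1) * (t - last) > k
    · simp [loopA, cA, S, h]
    · simp only [loopA, cA, h, if_false]
      rw [ih, show 1 + cA rest t (k - ((rest.length : Int) + 1) * (t - last)) =
          cA rest t (k - ((rest.length : Int) + 1) * (t - last)) + 1 from by omega]
      simp only [List.drop_succ_cons, S, Prod.mk.injEq]
      exact ⟨trivial, by ring⟩

theorem cA_le_length (fts : List (Int × Int)) (last k : Int) : cA fts last k ≤ fts.length := by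
  induction fts generalizing last k with
  | nil => simp [cA]
  | cons p rest ih =>
    obtain ⟨i, t⟩ := p
    by_cases h : ((rest.length : Int) + 1) * (t - last) > k
    · simp [cA, h]
    · simp only [cA, h, if_false, List.length_cons]
      have := ih t (k - ((rest.length : Int) + 1) * (t - last))
      omega

theorem S_le_of_lt_cA (fts : List (Int × Int)) (last k : Int) :
    ∀ j, j < cA fts last k → S fts last (j + 1) ≤ k := by
  induction fts generalizing last k with
  | nil => simp [cA]
  | cons p rest ih =>
    obtain ⟨i, t⟩ := p
    intro j hj
    by_cases h : ((rest.length : Int) + 1) * (t - last) > k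
    · simp [cA, h] at hj
    · simp only [cA, h, if_false] at hj
      cases j with
      | zero => simp [S]; omega
      | succ j' =>
        have := ih t (k - ((rest.length : Int) + 1) * (t - last)) j' (by omega)
        simp [S]
        omega

theorem S_gt_at_cA (fts : List (Int × Int)) (last k : Int) (h : cA fts last k < fts.length) :
    S fts last (cA fts last k + 1) > k := by
  induction fts generalizing last k with
  | nil => simp at h
  | cons p rest ih =>
    obtain ⟨i, t⟩ := p
    by_cases hb : ((rest.length : Int) + 1) * (t - last) > k
    · simp only [cA, hb, if_true]
      show S ((i, t) :: rest) last (0 + 1) > k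
      simp only [S]
      omega
    · simp only [cA, hb, if_false, List.length_cons] at h ⊢
      have := ih t (k - ((rest.length : Int) + 1) * (t - last)) (by omega)
      have heq : cA ((i, t) :: rest) last k = 1 + cA rest t (k - ((rest.length : Int) + 1) * (t - last)) := by
        simp [cA, hb]
      rw [show 1 + cA rest t (k - ((rest.length : Int) + 1) * (t - last)) + 1 =
          (cA rest t (k - ((rest.length : Int) + 1) * (t - last)) + 1) + 1 by omega]
      simp [S]
      omega

theorem S_mono_step (fts : List (Int × Int)) (last : Int)
    (hs : fts.Pairwise (fun a b => a.2 ≤ b.2)) :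
    ∀ j, S fts last (j + 1) ≤ S fts last (j + 2) := by
  induction fts generalizing last with
  | nil => intro j; simp [S]
  | cons p rest ih =>
    obtain ⟨i, t⟩ := p
    rw [List.pairwise_cons] at hs
    intro j
    cases j with
    | zero =>
      cases rest with
      | nil => simp [S]
      | cons q rest' =>
        obtain ⟨i', t'⟩ := q
        have ht : t ≤ t' := hs.1 (i', t') (by simp)
        simp [S]
        nlinarith [ht]
    | succ j' =>
      have := ih t hs.2 j'
      simp only [S]
      omega

theorem S_mono (fts : List (Int × Int)) (last : Int)
    (hs : fts.Pairwise (fun a b => a.2 ≤ b.2)) :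
    ∀ i j, i ≤ j → S fts last (i + 1) ≤ S fts last (j + 1) := by
  intro i j hij
  induction j with
  | zero =>
    have hi0 : i = 0 := by omega
    rw [hi0]
  | succ j' ih =>
    rcases Nat.lt_or_ge i (j' + 1) with h | h
    · exact le_trans (ih (by omega)) (S_mono_step fts last hs j')
    · have : i = j' + 1 := by omega
      simp [this]

theorem prefAux_getD (fts : List (Int × Int)) (last acc : Int) :
    ∀ j, (prefAux fts last acc).getD j 0 =
      if j < fts.length then acc + S fts last (j + 1) else 0 := by
  induction fts generalizing last acc with
  | nil => intro j; simp [prefAux]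
  | cons p rest ih =>
    obtain ⟨i, t⟩ := p
    intro j
    cases j with
    | zero => simp [prefAux, S]
    | succ j' =>
      simp only [prefAux, List.getD_cons_succ, List.length_cons]
      rw [ih]
      by_cases hj : j' < rest.length
      · simp [hj, show j' + 1 < rest.length + 1 by omega, S]
        ring
      · simp [hj, show ¬(j' + 1 < rest.length + 1) by omega]

theorem pref_getD (fts : List (Int × Int)) (c : Nat) (hc : c ≤ fts.length) :
    (0 :: prefAux fts 0 0).getD c 0 = S fts 0 c := by
  cases c with
  | zero => simp [S]
  | succ c' =>
    simp only [List.getD_cons_succ]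
    rw [prefAux_getD]
    simp [show c' < fts.length by omega]

theorem bsearch_spec (pref : List Int) (k : Int) :
    ∀ (d lo hi : Nat), hi - lo = d → lo ≤ hi →
    pref.getD (hi + 1) 0 > k →
    (∀ i j, lo ≤ i → i ≤ j → j ≤ hi → pref.getD (i + 1) 0 > k → pref.getD (j + 1) 0 > k) →
    lo ≤ bsearch pref k lo hi ∧ bsearch pref k lo hi ≤ hi ∧
    pref.getD (bsearch pref k lo hi + 1) 0 > k ∧
    (∀ j, lo ≤ j → j < bsearch pref k lo hi → ¬ pref.getD (j + 1) 0 > k) := by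
  intro d
  induction d using Nat.strong_induction_on with
  | _ d ih =>
    intro lo hi hd hle hhi hmono
    by_cases h : lo < hi
    · rw [bsearch, dif_pos h]
      set mid := (lo + hi) / 2 with hmid
      have hmb : lo ≤ mid ∧ mid < hi := by omega
      by_cases hp : pref.getD (mid + 1) 0 > k
      · rw [if_pos hp]
        have := ih (mid - lo) (by omega) lo mid rfl (by omega) hp
          (fun i j h1 h2 h3 => hmono i j h1 h2 (by omega))
        exact ⟨this.1, by omega, this.2.2.1, this.2.2.2⟩
      · rw [if_neg hp]
        have := ih (hi - (mid + 1)) (by omega) (mid + 1) hi rfl (by omega) hhi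
          (fun i j h1 h2 h3 => hmono i j (by omega) h2 h3)
        refine ⟨by omega, this.2.1, this.2.2.1, ?_⟩
        intro j hj1 hj2
        rcases Nat.lt_or_ge j (mid + 1) with hj | hj
        · intro hpj
          exact hp (hmono j mid hj1 (by omega) (by omega) hpj)
        · exact this.2.2.2 j hj hj2
    · rw [bsearch, dif_neg h]
      refine ⟨le_refl _, hle, ?_, ?_⟩
      · have hlh : lo = hi := by omega
        rw [hlh]; exact hhi
      · intro j h1 h2 _
        omega

-- the two ports agree
theorem solution_eq_alt (food_times : List Int) (k : Int) :
    solution food_times k = solution_alt food_times k := by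
  dsimp only [solution, solution_alt]
  set fts := PySem.List.sorted (PySem.List.enumerate food_times 1) (fun x => x.2) false with hfts
  have hs : fts.Pairwise (fun a b => a.2 ≤ b.2) := PySem.List.sorted_pairwise _ _
  set n := fts.length with hn
  set pref := (0 : Int) :: prefAux fts 0 0 with hpref
  rw [loopA_eq]
  set c := cA fts 0 k with hc
  have hcle : c ≤ n := cA_le_length fts 0 k
  by_cases hn0 : n = 0
  · have hnil : fts = [] := List.length_eq_zero_iff.mp (by omega)
    have hdrop : fts.drop c = [] := by rw [hnil]; simp
    rw [if_pos hdrop, if_pos (Or.inl hn0)]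
  -- n > 0
  · by_cases hfin : pref.getD n 0 ≤ k
    · -- A finishes everything: c = n, drop c = [], both -1
      have hSn : S fts 0 n ≤ k := by
        have h' := hfin
        rw [hpref, pref_getD fts n (le_refl n)] at h'
        exact h'
      have hcn : c = n := by
        by_contra hne
        have hlt : c < n := by omega
        have h1 : S fts 0 (c + 1) > k := S_gt_at_cA fts 0 k hlt
        have h2 : S fts 0 (c + 1) ≤ S fts 0 ((n - 1) + 1) := S_mono fts 0 hs c (n - 1) (by omega)
        rw [show (n - 1) + 1 = n by omega] at h2
        omega
      have hdrop : fts.drop c = [] := by rw [hcn, hn]; exact List.drop_length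
      rw [if_pos hdrop, if_pos (Or.inr hfin)]
    · -- A breaks at c < n; B binary-searches to the same c
      have hSn : S fts 0 n > k := by
        have h' : ¬ (0 :: prefAux fts 0 0).getD n 0 ≤ k := by rw [← hpref]; exact hfin
        rw [pref_getD fts n (le_refl n)] at h'
        omega
      have hclt : c < n := by
        by_contra hge
        have := S_le_of_lt_cA fts 0 k (n - 1) (by omega)
        rw [show (n - 1) + 1 = n by omega] at this
        omega
      have hmono : ∀ i j, 0 ≤ i → i ≤ j → j ≤ n - 1 →
          pref.getD (i + 1) 0 > k → pref.getD (j + 1) 0 > k := by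
        intro i j _ hij hjn hpi
        rw [hpref, pref_getD fts (i + 1) (by omega)] at hpi
        rw [hpref, pref_getD fts (j + 1) (by omega)]
        have := S_mono fts 0 hs i j hij
        omega
      have hhiP : pref.getD ((n - 1) + 1) 0 > k := by
        rw [show (n - 1) + 1 = n by omega, hpref, pref_getD fts n (le_refl n)]
        omega
      have hbs := bsearch_spec pref k (n - 1 - 0) 0 (n - 1) rfl (by omega) hhiP hmono
      set m := bsearch pref k 0 (n - 1) with hm
      have hPc : pref.getD (c + 1) 0 > k := by
        rw [hpref, pref_getD fts (c + 1) (by omega)]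
        exact S_gt_at_cA fts 0 k hclt
      have hcm : c = m := by
        by_contra hne
        rcases Nat.lt_or_ge c m with hlt | hge
        · exact hbs.2.2.2 c (by omega) hlt hPc
        · have hmc : m < c := by omega
          have hSm := S_le_of_lt_cA fts 0 k m hmc
          have hPm := hbs.2.2.1
          rw [hpref, pref_getD fts (m + 1) (by omega)] at hPm
          omega
      have hdropne : ¬ (fts.drop c = []) := by
        intro hdrop
        have := List.drop_eq_nil_iff.mp hdrop
        omega
      have hB : ¬ (n = 0 ∨ pref.getD n 0 ≤ k) := fun hor => hor.elim hn0 hfin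
      rw [if_neg hdropne, if_neg hB, ← hcm]
      have hkc : (k - S fts 0 c) = (k - pref.getD c 0) := by
        rw [hpref, pref_getD fts c (by omega)]
      rw [hkc]

-- ===== VERDICT (by name: the statement is the Claim_ definition above) =====
theorem solution_spec : Claim_equal_solution := by
  intro food_times k _
  unfold Spec_solution
  exact solution_eq_alt food_times k
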